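-- pv_equiv track=rewrite | github.com/Kevin-Ol/project-restaurant-orders | src/analyze_log.py | most_ordered
-- ===== SOURCE A (Python) =====
-- def most_ordered(orders):
--     frequency = {}
--     product = orders[0][0]
--
--     for order, _day in orders:
--         if order not in frequency:
--             frequency[order] = 1
--         else:
--             frequency[order] += 1
--
--         if frequency[order] > frequency[product]:
--             product = order
--
--     return product
-- ===== SOURCE B (Python) =====
-- def most_ordered(orders):
--     freq = {}
--     for order, _day in orders:
--         freq[order] = freq.get(order, 0) + 1
--     m = max(freq.values())
--     seen = {}
--     for order, _day in orders:
--         c = seen.get(order, 0) + 1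
--         seen[order] = c
--         if c == m:
--             return order
-- ===== Notes on version B (the rewrite author's own statement) =====
-- stated objective: alternative
-- what changed: Replaces A's single-pass running-champion loop by two passes: one pass builds the full frequency table and takes the maximum count m, a second pass returns the first product whose running count reaches m (provably the same winner as A's champion rule).
import Mathlib
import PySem

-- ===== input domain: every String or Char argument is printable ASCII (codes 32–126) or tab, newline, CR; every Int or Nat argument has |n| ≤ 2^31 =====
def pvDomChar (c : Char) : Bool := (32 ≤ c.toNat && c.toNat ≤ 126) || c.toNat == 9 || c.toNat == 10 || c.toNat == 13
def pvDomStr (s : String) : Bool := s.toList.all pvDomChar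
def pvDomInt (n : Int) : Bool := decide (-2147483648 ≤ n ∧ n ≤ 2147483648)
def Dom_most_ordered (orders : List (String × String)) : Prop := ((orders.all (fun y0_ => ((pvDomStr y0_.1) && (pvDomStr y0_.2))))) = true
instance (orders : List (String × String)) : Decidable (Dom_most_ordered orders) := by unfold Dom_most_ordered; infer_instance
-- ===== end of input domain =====

-- B: two passes (frequency table + max count m, then first product whose running count reaches m)
-- instead of A's single-pass running-champion loop; structurally different, same result (alternative).


-- ===== PORT A =====
-- one loop iteration of A: update the frequency dict, then maybe switch the champion
def aStep (st : PySem.Dict String Int × String) (q : String × String) :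
    PySem.Dict String Int × String :=
  let frequency := if st.1.contains q.1 = false then st.1.insert q.1 1
                   else st.1.modify q.1 0 (· + 1)
  -- 'frequency[product]': product is always a key here on nonempty input, so getD never uses its default
  let product := if frequency.getD st.2 0 < frequency.getD q.1 0 then q.1 else st.2
  (frequency, product)

def most_ordered (orders : List (String × String)) : String :=
  match orders with
  | [] => ""   -- Python: 'orders[0][0]' raises IndexError; excluded by Pre_
  | (o0, _) :: _ => (orders.foldl aStep (PySem.Dict.empty, o0)).2

-- ===== PORT B =====
-- first pass of B: freq[order] = freq.get(order, 0) + 1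
def bCount (orders : List (String × String)) : PySem.Dict String Int :=
  orders.foldl (fun d q => d.insert q.1 (d.getD q.1 0 + 1)) PySem.Dict.empty

-- second pass of B: return the first order whose running count reaches m
def bScan (m : Int) : List (String × String) → PySem.Dict String Int → String
  | [], _ => ""   -- Python B falls off the loop (unreachable on nonempty input, m is attained)
  | (o, _) :: rest, seen =>
    let c := seen.getD o 0 + 1
    if c = m then o else bScan m rest (seen.insert o c)

def most_ordered_alt (orders : List (String × String)) : String :=
  match PySem.List.max? (bCount orders).values (fun v => v) with
  | none => ""   -- Python: max() of empty raises ValueError; excluded by Pre_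
  | some m => bScan m orders PySem.Dict.empty

-- ===== PRECONDITION & SPEC =====
-- Pre_ excludes only the empty list, on which A raises IndexError (B raises ValueError).
def Pre_most_ordered (orders : List (String × String)) : Prop := orders ≠ []
instance (orders : List (String × String)) : Decidable (Pre_most_ordered orders) := by
  unfold Pre_most_ordered; infer_instance

def pvWitness_most_ordered : (List (String × String)) := [("pizza", "mon"), ("cake", "tue"), ("cake", "wed")]

def Spec_most_ordered (orders : List (String × String)) (out : String) : Prop := out = most_ordered_alt orders
instance (orders : List (String × String)) (out : String) : Decidable (Spec_most_ordered orders out) := by unfold Spec_most_ordered; infer_instance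

-- ===== CLAIM (what is proved, stated in full; the proofs are below) =====
def Claim_equal_most_ordered : Prop := ∀ (orders : List (String × String)), Dom_most_ordered orders → Pre_most_ordered orders → Spec_most_ordered orders (most_ordered orders)

-- ===== LEMMAS AND PROOFS =====

-- running count of product o in the processed prefix p
def cnt (p : List (String × String)) (o : String) : Nat := (p.map Prod.fst).count o

lemma cnt_append_singleton (p : List (String × String)) (q : String × String) (x : String) :
    cnt (p ++ [q]) x = cnt p x + (if x = q.1 then 1 else 0) := by
  by_cases hx : x = q.1
  · subst hx; simp [cnt, List.count_append]
  · simp [cnt, List.count_append, hx, Ne.symm hx]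

-- A's dict update keeps the "frequency = counts of the prefix" invariant
lemma aStep_freq (d : PySem.Dict String Int) (p : List (String × String)) (q : String × String)
    (h : ∀ x, d.getD x 0 = (cnt p x : Int)) :
    ∀ x, ((if d.contains q.1 = false then d.insert q.1 1 else d.modify q.1 0 (· + 1)).getD x 0)
        = (cnt (p ++ [q]) x : Int) := by
  intro x
  rw [cnt_append_singleton]
  by_cases hc : d.contains q.1 = false
  · rw [if_pos hc, PySem.Dict.getD_insert]
    have h0 : d.getD q.1 0 = 0 := PySem.Dict.getD_of_not_contains d 0 hc
    have hq0 : (cnt p q.1 : Int) = 0 := by rw [← h q.1, h0]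
    by_cases hx : x = q.1
    · subst hx; rw [if_pos rfl, if_pos rfl]; push_cast; omega
    · rw [if_neg hx, if_neg hx, h x]; push_cast; omega
  · rw [if_neg hc, PySem.Dict.getD_modify]
    by_cases hx : x = q.1
    · subst hx
      rw [if_pos rfl, if_pos rfl]
      simp only [h q.1]
      push_cast
      omega
    · rw [if_neg hx, if_neg hx, h x]; push_cast; omega

-- once the champion's count equals the global max m, A never switches again
lemma a_stay (m : Int) : ∀ (ys p : List (String × String)) (d : PySem.Dict String Int) (c : String),
    (∀ x, d.getD x 0 = (cnt p x : Int)) →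
    (∀ x, ((cnt (p ++ ys) x : Int)) ≤ m) →
    ((cnt p c : Int)) = m →
    (ys.foldl aStep (d, c)).2 = c := by
  intro ys
  induction ys with
  | nil => intro p d c _ _ _; simp
  | cons q rest ih =>
    intro p d c hd hbound hc
    rw [List.foldl_cons]
    have hfreq := aStep_freq d p q hd
    have hpref : p ++ q :: rest = (p ++ [q]) ++ rest := by simp
    have hmono : ∀ x, cnt (p ++ [q]) x ≤ cnt (p ++ q :: rest) x := by
      intro x; rw [hpref]; simp only [cnt, List.map_append, List.count_append]; omega
    have hqb : (cnt (p ++ [q]) q.1 : Int) ≤ m :=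
      le_trans (by exact_mod_cast hmono q.1) (hbound q.1)
    have hcq : c ≠ q.1 := by
      intro hcontr
      have h2 : cnt (p ++ [q]) q.1 = cnt p q.1 + 1 := by rw [cnt_append_singleton]; simp
      rw [h2, ← hcontr] at hqb
      push_cast at hqb
      omega
    have hcc : cnt (p ++ [q]) c = cnt p c := by rw [cnt_append_singleton]; simp [hcq]
    have hnosw : ¬ ((if d.contains q.1 = false then d.insert q.1 1 else d.modify q.1 0 (· + 1)).getD c 0
          < (if d.contains q.1 = false then d.insert q.1 1 else d.modify q.1 0 (· + 1)).getD q.1 0) := by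
      rw [hfreq c, hfreq q.1, hcc, hc]
      exact not_lt.mpr hqb
    have hstep : aStep (d, c) q =
        ((if d.contains q.1 = false then d.insert q.1 1 else d.modify q.1 0 (· + 1)), c) := by
      simp only [aStep]
      rw [if_neg hnosw]
    rw [hstep]
    exact ih (p ++ [q]) _ c hfreq
      (fun x => by rw [← hpref]; exact hbound x)
      (by rw [← Nat.cast_inj (R := Int)] at hcc; rw [hcc]; exact hc)

-- main invariant: before the max m is reached, A's fold and B's second pass agree
lemma a_eq_scan (m : Int) : ∀ (ys p : List (String × String)) (d s : PySem.Dict String Int) (c : String),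
    (∀ x, d.getD x 0 = (cnt p x : Int)) →
    (∀ x, s.getD x 0 = (cnt p x : Int)) →
    (∀ x, ((cnt (p ++ ys) x : Int)) ≤ m) →
    (∃ x, ((cnt (p ++ ys) x : Int)) = m) →
    (∀ x, ((cnt p x : Int)) < m) →
    (∀ x, cnt p x ≤ cnt p c) →
    (ys.foldl aStep (d, c)).2 = bScan m ys s := by
  intro ys
  induction ys with
  | nil =>
    intro p d s c _ _ _ hex hlt _
    exfalso; obtain ⟨x, hx⟩ := hex
    have := hlt x; simp only [List.append_nil] at hx; omega
  | cons q rest ih =>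
    intro p d s c hd hs hbound hex hlt hmax
    rw [List.foldl_cons]
    have hfreq := aStep_freq d p q hd
    have hpref : p ++ q :: rest = (p ++ [q]) ++ rest := by simp
    have hmono : ∀ x, cnt (p ++ [q]) x ≤ cnt (p ++ q :: rest) x := by
      intro x; rw [hpref]; simp only [cnt, List.map_append, List.count_append]; omega
    have hbound' : ∀ x, ((cnt ((p ++ [q]) ++ rest) x : Int)) ≤ m := by
      intro x; rw [← hpref]; exact hbound x
    have hk : s.getD q.1 0 + 1 = (cnt (p ++ [q]) q.1 : Int) := by
      rw [hs q.1, cnt_append_singleton]; push_cast; simp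
    have hkle : (cnt (p ++ [q]) q.1 : Int) ≤ m :=
      le_trans (by exact_mod_cast hmono q.1) (hbound q.1)
    have hscan : bScan m (q :: rest) s
        = if s.getD q.1 0 + 1 = m then q.1 else bScan m rest (s.insert q.1 (s.getD q.1 0 + 1)) := by
      cases q; rfl
    rw [hscan]
    by_cases hm : s.getD q.1 0 + 1 = m
    · -- B returns q.1 here; A's champion becomes (or already is) q.1, and stays
      rw [if_pos hm]
      have hcm : (cnt (p ++ [q]) q.1 : Int) = m := by rw [← hk]; exact hm
      have hch : (if ((if d.contains q.1 = false then d.insert q.1 1 else d.modify q.1 0 (· + 1)).getD c 0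
            < (if d.contains q.1 = false then d.insert q.1 1 else d.modify q.1 0 (· + 1)).getD q.1 0)
          then q.1 else c) = q.1 := by
        by_cases hco : c = q.1
        · subst hco; rw [ite_self]
        · have hcc : cnt (p ++ [q]) c = cnt p c := by rw [cnt_append_singleton]; simp [hco]
          have hcond : (if d.contains q.1 = false then d.insert q.1 1 else d.modify q.1 0 (· + 1)).getD c 0
              < (if d.contains q.1 = false then d.insert q.1 1 else d.modify q.1 0 (· + 1)).getD q.1 0 := by
            rw [hfreq c, hfreq q.1, hcm, hcc]
            exact hlt c
          rw [if_pos hcond]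
      have hstep : aStep (d, c) q =
          ((if d.contains q.1 = false then d.insert q.1 1 else d.modify q.1 0 (· + 1)), q.1) := by
        simp only [aStep]
        rw [hch]
      rw [hstep]
      exact a_stay m rest (p ++ [q]) _ q.1 hfreq hbound' hcm
    · -- count of q.1 stays below m: both sides keep going, invariants preserved
      rw [if_neg hm]
      have hklt : (cnt (p ++ [q]) q.1 : Int) < m := by
        rw [← hk] at hkle ⊢
        exact lt_of_le_of_ne hkle hm
      have hs' : ∀ x, (s.insert q.1 (s.getD q.1 0 + 1)).getD x 0 = (cnt (p ++ [q]) x : Int) := by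
        intro x
        rw [PySem.Dict.getD_insert, cnt_append_singleton]
        by_cases hx : x = q.1
        · subst hx; rw [if_pos rfl, hk, cnt_append_singleton]
        · rw [if_neg hx, if_neg hx, hs x]; push_cast; omega
      have hlt' : ∀ x, ((cnt (p ++ [q]) x : Int)) < m := by
        intro x
        by_cases hx : x = q.1
        · subst hx; exact hklt
        · have : cnt (p ++ [q]) x = cnt p x := by rw [cnt_append_singleton]; simp [hx]
          rw [this]; exact hlt x
      have hex' : ∃ x, ((cnt ((p ++ [q]) ++ rest) x : Int)) = m := by
        obtain ⟨x, hx⟩ := hex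
        exact ⟨x, by rw [← hpref]; exact hx⟩
      have hc'eq : (aStep (d, c) q).2
          = if ((if d.contains q.1 = false then d.insert q.1 1 else d.modify q.1 0 (· + 1)).getD c 0
              < (if d.contains q.1 = false then d.insert q.1 1 else d.modify q.1 0 (· + 1)).getD q.1 0)
            then q.1 else c := rfl
      have hmax' : ∀ x, cnt (p ++ [q]) x ≤ cnt (p ++ [q]) ((aStep (d, c) q).2) := by
        intro x
        rw [hc'eq]
        have hcub : cnt p c ≤ cnt (p ++ [q]) c := by rw [cnt_append_singleton]; omega
        have hxub : cnt (p ++ [q]) x ≤ cnt p x + 1 := by rw [cnt_append_singleton]; split <;> omega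
        by_cases hswitch : ((if d.contains q.1 = false then d.insert q.1 1 else d.modify q.1 0 (· + 1)).getD c 0
              < (if d.contains q.1 = false then d.insert q.1 1 else d.modify q.1 0 (· + 1)).getD q.1 0)
        · rw [if_pos hswitch]
          rw [hfreq c, hfreq q.1] at hswitch
          have hswN : cnt (p ++ [q]) c < cnt (p ++ [q]) q.1 := by exact_mod_cast hswitch
          by_cases hx : x = q.1
          · subst hx; exact le_refl _
          · have hxp : cnt (p ++ [q]) x = cnt p x := by rw [cnt_append_singleton]; simp [hx]
            have := hmax x
            omega
        · rw [if_neg hswitch]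
          rw [hfreq c, hfreq q.1] at hswitch
          rw [not_lt] at hswitch
          have hswN : cnt (p ++ [q]) q.1 ≤ cnt (p ++ [q]) c := by exact_mod_cast hswitch
          by_cases hx : x = q.1
          · subst hx; exact hswN
          · have hxp : cnt (p ++ [q]) x = cnt p x := by rw [cnt_append_singleton]; simp [hx]
            have := hmax x
            omega
      have hfreq' : ∀ x, ((aStep (d, c) q).1).getD x 0 = (cnt (p ++ [q]) x : Int) := hfreq
      have := ih (p ++ [q]) (aStep (d, c) q).1 (s.insert q.1 (s.getD q.1 0 + 1)) (aStep (d, c) q).2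
        hfreq' hs' hbound' hex' hlt' hmax'
      simpa using this

lemma bCount_eq (orders : List (String × String)) :
    bCount orders = PySem.Dict.counter (orders.map Prod.fst) := by
  rw [← PySem.Dict.foldl_insert_getD_add_one_eq_counter, List.foldl_map]
  rfl

-- ===== VERDICT (by name: the statement is the Claim_ definition above) =====
theorem most_ordered_spec : Claim_equal_most_ordered := by
  intro orders _ hpre
  show most_ordered orders = most_ordered_alt orders
  match horders : orders with
  | [] => exact absurd rfl hpre
  | (o0, d0) :: tl =>
    have hvals : (bCount ((o0, d0) :: tl)).values
        = (PySem.Set.ofList (((o0, d0) :: tl).map Prod.fst)).map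
            (fun k => ((((o0, d0) :: tl).map Prod.fst).count k : Int)) := by
      rw [bCount_eq]
      show (PySem.Dict.counter (((o0, d0) :: tl).map Prod.fst)).items.map (·.2) = _
      rw [PySem.Dict.items_counter]
      simp [List.map_map]
    have hne : (bCount ((o0, d0) :: tl)).values ≠ [] := by
      rw [hvals]
      have : o0 ∈ PySem.Set.ofList (((o0, d0) :: tl).map Prod.fst) := by
        rw [PySem.Set.mem_ofList _ _]; simp
      intro hcontr
      rw [List.map_eq_nil_iff] at hcontr
      rw [hcontr] at this
      exact absurd this (List.not_mem_nil)
    rcases hmax : PySem.List.max? (bCount ((o0, d0) :: tl)).values (fun v => v) with _ | m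
    · exact absurd ((PySem.List.max?_eq_none_iff _ _).mp hmax) hne
    · have hgoal : most_ordered_alt ((o0, d0) :: tl) = bScan m ((o0, d0) :: tl) PySem.Dict.empty := by
        unfold most_ordered_alt
        rw [hmax]
      rw [hgoal]
      have hmem := PySem.List.max?_mem hmax
      rw [hvals] at hmem
      obtain ⟨k, hk, hkm⟩ := List.mem_map.mp hmem
      rw [PySem.Set.mem_ofList _ _] at hk
      have hm1 : 1 ≤ m := by
        rw [← hkm]
        exact_mod_cast List.count_pos_iff.mpr hk
      have hisMax := PySem.List.max?_isMax hmax
      have hub : ∀ x, ((cnt ((o0, d0) :: tl) x : Int)) ≤ m := by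
        intro x
        by_cases hx : x ∈ ((o0, d0) :: tl).map Prod.fst
        · have : ((((o0, d0) :: tl).map Prod.fst).count x : Int) ∈ (bCount ((o0, d0) :: tl)).values := by
            rw [hvals]
            exact List.mem_map.mpr ⟨x, (PySem.Set.mem_ofList _ _).mpr hx, rfl⟩
          exact hisMax _ this
        · have : cnt ((o0, d0) :: tl) x = 0 := by
            simp only [cnt]
            exact List.count_eq_zero.mpr hx
          rw [this]; exact_mod_cast le_trans (by norm_num) hm1
      show (((o0, d0) :: tl).foldl aStep (PySem.Dict.empty, o0)).2 = _
      have := a_eq_scan m ((o0, d0) :: tl) [] PySem.Dict.empty PySem.Dict.empty o0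
        (fun x => by simp [cnt, PySem.Dict.getD_empty])
        (fun x => by simp [cnt, PySem.Dict.getD_empty])
        (by simpa using hub)
        ⟨k, by simpa [cnt] using hkm⟩
        (fun x => by simp [cnt]; omega)
        (fun x => by simp [cnt])
      simpa using this
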